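-- pv_equiv track=rewrite | github.com/shivyelave/Wages | emp.py | count_leave_half_full_days
-- ===== SOURCE A (Python) =====
-- def count_leave_half_full_days(month_wages):
--
--     """
--
--     Description:
--         Function to count the number of leave days, full days, and half days based on monthly wage data.
--
--     Parameters:
--         month_wages (list): A list of daily wages for the month.
--
--     Returns:
--         list: A list containing three integers:
--             - Number of leave days (absent days)
--             - Number of full days
--             - Number of half days
--
--     """
--
--     half_day = full_day = leaves = 0
--     for day in month_wages:
--         if day == 0:
--             leaves += 1
--         elif day == max(month_wages):
--             full_day += 1
--         else:
--             half_day += 1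
--     return [leaves, full_day, half_day]
-- ===== SOURCE B (Python) =====
-- def count_leave_half_full_days(month_wages):
--     if not month_wages:
--         return [0, 0, 0]
--     m = max(month_wages)
--     leaves = month_wages.count(0)
--     full = month_wages.count(m) if m != 0 else 0
--     return [leaves, full, len(month_wages) - leaves - full]
-- ===== Notes on version B (the rewrite author's own statement) =====
-- stated objective: faster
-- what changed: Replaces the per-element if/elif/else scan (which recomputes max(month_wages) on every iteration) with one max and two count passes plus a length subtraction for half days.
import Mathlib
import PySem

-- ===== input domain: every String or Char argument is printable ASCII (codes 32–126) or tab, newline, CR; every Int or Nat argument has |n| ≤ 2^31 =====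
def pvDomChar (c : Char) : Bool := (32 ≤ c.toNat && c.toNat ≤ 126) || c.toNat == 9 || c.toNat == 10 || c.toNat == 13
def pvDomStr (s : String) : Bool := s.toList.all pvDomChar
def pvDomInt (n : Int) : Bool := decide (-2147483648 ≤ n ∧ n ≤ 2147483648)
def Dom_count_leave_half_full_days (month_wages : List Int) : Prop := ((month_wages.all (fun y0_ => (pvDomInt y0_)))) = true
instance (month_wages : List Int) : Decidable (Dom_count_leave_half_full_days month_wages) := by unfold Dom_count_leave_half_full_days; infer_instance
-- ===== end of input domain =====

-- B replaces A's per-element if/elif/else scan (which recomputes max(month_wages) each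
-- iteration) with one max + two count passes and a length subtraction (objective: faster).


-- ===== PORT A =====
-- state = (half_day, full_day, leaves); 'max(month_wages)' re-evaluated in each iteration as in A
def count_leave_half_full_days (month_wages : List Int) : List Int :=
  let s := month_wages.foldl
    (fun (st : Int × Int × Int) day =>
      if day = 0 then (st.1, st.2.1, st.2.2 + 1)
      else if some day = PySem.List.max? month_wages (fun y => y) then (st.1, st.2.1 + 1, st.2.2)
      else (st.1 + 1, st.2.1, st.2.2))
    (0, 0, 0)
  [s.2.2, s.2.1, s.1]

-- ===== PORT B =====
-- Source B: guard empty list; m = max(...) (list nonempty, so '.getD 0' never matters);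
-- leaves/full via list.count; half by subtraction
def count_leave_half_full_days_alt (month_wages : List Int) : List Int :=
  if month_wages = [] then [0, 0, 0]
  else
    let m := (PySem.List.max? month_wages (fun y => y)).getD 0
    let leaves : Int := PySem.List.count month_wages 0
    let full : Int := if m ≠ 0 then PySem.List.count month_wages m else 0
    [leaves, full, (month_wages.length : Int) - leaves - full]

-- ===== PRECONDITION & SPEC =====
def Spec_count_leave_half_full_days (month_wages : List Int) (out : List Int) : Prop := out = count_leave_half_full_days_alt month_wages
instance (month_wages : List Int) (out : List Int) : Decidable (Spec_count_leave_half_full_days month_wages out) := by unfold Spec_count_leave_half_full_days; infer_instance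

-- ===== CLAIM (what is proved, stated in full; the proofs are below) =====
def Claim_equal_count_leave_half_full_days : Prop := ∀ (month_wages : List Int), Dom_count_leave_half_full_days month_wages → Spec_count_leave_half_full_days month_wages (count_leave_half_full_days month_wages)

-- ===== LEMMAS AND PROOFS =====

-- A's loop, with the (constant) max test abstracted to a predicate p, counts the three branches.
theorem pvFoldCounts (p : Int → Prop) [DecidablePred p] (l : List Int) (h f v : Int) :
    l.foldl
      (fun (st : Int × Int × Int) day =>
        if day = 0 then (st.1, st.2.1, st.2.2 + 1)
        else if p day then (st.1, st.2.1 + 1, st.2.2)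
        else (st.1 + 1, st.2.1, st.2.2))
      (h, f, v)
    = (h + (l.countP (fun d => !(d == 0) && !(decide (p d))) : Int),
       f + (l.countP (fun d => !(d == 0) && decide (p d)) : Int),
       v + (l.count 0 : Int)) := by
  induction l generalizing h f v with
  | nil => simp
  | cons x t ih =>
    simp only [List.foldl_cons]
    by_cases hx : x = 0
    · simp [hx, ih]
      ring_nf
    · by_cases hp : p x
      · simp [hx, hp, ih]
        ring_nf
      · simp [hx, hp, ih]
        ring_nf

theorem pvCountPSplit (p q : Int → Bool) (l : List Int) :
    l.countP p = l.countP (fun d => p d && q d) + l.countP (fun d => p d && !q d) := by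
  induction l with
  | nil => simp
  | cons x t ih =>
    simp only [List.countP_cons, ih]
    by_cases hp : p x = true <;> by_cases hq : q x = true <;> simp [hp, hq] <;> ring

-- ===== VERDICT (by name: the statement is the Claim_ definition above) =====
theorem count_leave_half_full_days_spec : Claim_equal_count_leave_half_full_days := by
  intro xs _
  show count_leave_half_full_days xs = count_leave_half_full_days_alt xs
  rcases hxs : xs with _ | ⟨a, t⟩
  · rfl
  rw [← hxs]
  have hne : xs ≠ [] := by simp [hxs]
  obtain ⟨m, hm⟩ : ∃ m, PySem.List.max? xs (fun y => y) = some m := by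
    cases h : PySem.List.max? xs (fun y => y) with
    | none => exact absurd ((PySem.List.max?_eq_none_iff xs _).mp h) hne
    | some m => exact ⟨m, rfl⟩
  unfold count_leave_half_full_days count_leave_half_full_days_alt
  simp only [hne, hm, Option.getD_some, ite_false]
  rw [pvFoldCounts (fun day => some day = some m) xs 0 0 0]
  simp only [zero_add, PySem.List.count_eq, List.cons.injEq, and_true]
  have hfull : (List.countP (fun d => !d == 0 && decide (some d = some m)) xs : Int)
      = if m ≠ 0 then (List.count m xs : Int) else 0 := by
    by_cases hm0 : m = 0
    · simp [hm0]
    · have h2 : List.countP (fun d => !d == 0 && decide (some d = some m)) xs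
          = List.countP (fun d => d == m) xs := by
        apply List.countP_congr
        intro d _
        by_cases hd : d = m
        · simp [hd, hm0]
        · simp [hd]
      have h3 : List.count m xs = List.countP (fun d => d == m) xs := List.count_eq_countP ..
      rw [if_pos hm0]
      exact_mod_cast h2.trans h3.symm
  refine ⟨trivial, hfull, ?_⟩
  rw [← hfull]
  have hsplit := pvCountPSplit (fun d => !(d == 0)) (fun d => decide (some d = some m)) xs
  have hlen := pvCountPSplit (fun _ => true) (fun d => d == 0) xs
  simp only [List.countP_true, Bool.true_and] at hlen
  have hc0 : List.count 0 xs = List.countP (fun d => d == 0) xs := List.count_eq_countP ..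
  omega
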